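-- pv_equiv track=rewrite | github.com/noorjuhaidah/P10-6-Python-Project | SentimentAnalysis.py | sliding_window_segments
-- ===== SOURCE A (Python) =====
-- from typing import List, Tuple, Dict, Optional, Set
--
-- def sliding_window_segments(scores: List[int], k: int):
--     """
--     Fixed window analysis over sentence scores.
--     Returns:
--       best_pos: (sum, (start_idx, end_idx))  # largest window sum
--       best_neg: (sum, (start_idx, end_idx))  # smallest window sum
--     If k <= 0 or not enough sentences, returns (None, None).
--     """
--     n = len(scores)
--     if k <= 0 or n < k:
--         return None, None
--
--     window_sum = sum(scores[:k])
--     max_sum, max_rng = window_sum, (0, k - 1)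
--     min_sum, min_rng = window_sum, (0, k - 1)
--
--     for i in range(k, n):
--         window_sum += scores[i] - scores[i - k]
--         if window_sum > max_sum:
--             max_sum, max_rng = window_sum, (i - k + 1, i)
--         if window_sum < min_sum:
--             min_sum, min_rng = window_sum, (i - k + 1, i)
--
--     return (max_sum, max_rng), (min_sum, min_rng)
-- ===== SOURCE B (Python) =====
-- def sliding_window_segments(scores, k):
--     """Staged pipeline: build a prefix-sum table, materialise the list of all
--     window sums, then pick the extremes with max()/min() over enumerate
--     (Python's max/min return the FIRST extremal element, matching A's strict
--     comparisons)."""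
--     n = len(scores)
--     if k <= 0 or n < k:
--         return None, None
--
--     prefix = [0]
--     for x in scores:
--         prefix.append(prefix[-1] + x)
--
--     sums = [prefix[s + k] - prefix[s] for s in range(n - k + 1)]
--
--     i, mx = max(enumerate(sums), key=lambda p: p[1])
--     j, mn = min(enumerate(sums), key=lambda p: p[1])
--     return (mx, (i, i + k - 1)), (mn, (j, j + k - 1))
-- ===== Notes on version B (the rewrite author's own statement) =====
-- stated objective: alternative
-- what changed: B replaces A's single rolling-window pass by a staged pipeline: a prefix-sum table, an explicit list of all window sums, and first-occurrence argmax/argmin via max()/min() over enumerate, instead of A's in-loop running update and comparisons.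
import Mathlib
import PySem

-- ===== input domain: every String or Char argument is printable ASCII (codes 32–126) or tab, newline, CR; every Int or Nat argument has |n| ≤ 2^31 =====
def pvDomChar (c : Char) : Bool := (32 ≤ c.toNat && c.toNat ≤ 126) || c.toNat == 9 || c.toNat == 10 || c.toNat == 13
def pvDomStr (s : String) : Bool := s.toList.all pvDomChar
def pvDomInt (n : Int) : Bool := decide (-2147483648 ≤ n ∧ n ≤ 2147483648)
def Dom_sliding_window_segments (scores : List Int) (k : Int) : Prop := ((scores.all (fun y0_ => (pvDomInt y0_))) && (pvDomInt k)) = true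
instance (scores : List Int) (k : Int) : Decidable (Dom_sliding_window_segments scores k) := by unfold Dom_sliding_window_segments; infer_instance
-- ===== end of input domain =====

-- B replaces A's rolling single pass by a staged pipeline (prefix-sum table,
-- explicit list of window sums, first-occurrence max/min over enumerate);
-- objective: alternative decomposition, same asymptotic cost.

-- ===== PORT A =====
-- Loop indices i and i-k are always in range (k ≤ i < n), so pyGetD is exact here.
def sliding_window_segments (scores : List Int) (k : Int) : (Option (Int × (Int × Int))) × (Option (Int × (Int × Int))) :=
  let n : Int := scores.length
  if k ≤ 0 ∨ n < k then (none, none)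
  else
    let ws0 : Int := (PySem.List.slice scores none (some k)).sum
    let r := (PySem.List.pyRange k n 1).foldl
      (fun (st : Int × (Int × (Int × Int)) × (Int × (Int × Int))) i =>
        let ws := st.1 + PySem.List.pyGetD scores i 0 - PySem.List.pyGetD scores (i - k) 0
        let mx := if ws > st.2.1.1 then (ws, (i - k + 1, i)) else st.2.1
        let mn := if ws < st.2.2.1 then (ws, (i - k + 1, i)) else st.2.2
        (ws, mx, mn))
      (ws0, (ws0, ((0 : Int), k - 1)), (ws0, ((0 : Int), k - 1)))
    (some r.2.1, some r.2.2)

-- ===== PORT B =====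
-- prefix has length n+1 and the comprehension indexes it with 0 ≤ s ≤ s+k ≤ n,
-- so pyGetD is exact; sums is nonempty (n-k+1 ≥ 1), so Python's max/min cannot
-- raise and the `none` match arm is unreachable.
def sliding_window_segments_alt (scores : List Int) (k : Int) : (Option (Int × (Int × Int))) × (Option (Int × (Int × Int))) :=
  let n : Int := scores.length
  if k ≤ 0 ∨ n < k then (none, none)
  else
    let pre := scores.foldl (fun (p : List Int) x => p ++ [PySem.List.pyGetD p (-1) 0 + x]) [0]
    let sums := (PySem.List.pyRange 0 (n - k + 1) 1).map
      (fun s => PySem.List.pyGetD pre (s + k) 0 - PySem.List.pyGetD pre s 0)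
    match PySem.List.max? (PySem.List.enumerate sums 0) (fun p => p.2),
          PySem.List.min? (PySem.List.enumerate sums 0) (fun p => p.2) with
    | some (i, mx), some (j, mn) => (some (mx, (i, i + k - 1)), some (mn, (j, j + k - 1)))
    | _, _ => (none, none)

-- ===== PRECONDITION & SPEC =====
def Spec_sliding_window_segments (scores : List Int) (k : Int) (out : (Option (Int × (Int × Int))) × (Option (Int × (Int × Int)))) : Prop := out = sliding_window_segments_alt scores k
instance (scores : List Int) (k : Int) (out : (Option (Int × (Int × Int))) × (Option (Int × (Int × Int)))) : Decidable (Spec_sliding_window_segments scores k out) := by unfold Spec_sliding_window_segments; infer_instance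

-- ===== CLAIM (what is proved, stated in full; the proofs are below) =====
def Claim_equal_sliding_window_segments : Prop := ∀ (scores : List Int) (k : Int), Dom_sliding_window_segments scores k → Spec_sliding_window_segments scores k (sliding_window_segments scores k)

-- ===== LEMMAS AND PROOFS =====

-- prefix sum of the first j elements
def pvP (sc : List Int) (j : Nat) : Int := (sc.take j).sum
-- sum of the window of length kn starting at s
def pvW (sc : List Int) (kn s : Nat) : Int := pvP sc (s + kn) - pvP sc s

-- common selection step: fold state = ((max_sum, max_rng), (min_sum, min_rng))
def pvSel (k w s : Int) (st : (Int × (Int × Int)) × (Int × (Int × Int))) : (Int × (Int × Int)) × (Int × (Int × Int)) :=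
  (if w > st.1.1 then (w, (s, s + k - 1)) else st.1,
   if w < st.2.1 then (w, (s, s + k - 1)) else st.2)

def pvSelFold (sc : List Int) (kn j : Nat) : (Int × (Int × Int)) × (Int × (Int × Int)) :=
  (List.range j).foldl (fun st t => pvSel (kn : Int) (pvW sc kn (t + 1)) ((t : Int) + 1) st)
    ((pvW sc kn 0, ((0 : Int), (kn : Int) - 1)), (pvW sc kn 0, ((0 : Int), (kn : Int) - 1)))

theorem pvP_succ (sc : List Int) (j : Nat) (h : j < sc.length) :
    pvP sc (j + 1) = pvP sc j + sc.getD j 0 := by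
  rw [pvP, pvP, List.take_add_one, List.getElem?_eq_getElem h, List.sum_append]
  simp [List.getD_eq_getElem?_getD, List.getElem?_eq_getElem h]

theorem pvW_succ (sc : List Int) (kn j : Nat) (h : j + kn < sc.length) :
    pvW sc kn (j + 1) = pvW sc kn j + sc.getD (j + kn) 0 - sc.getD j 0 := by
  have h2 : j < sc.length := by omega
  simp only [pvW]
  rw [show j + 1 + kn = (j + kn) + 1 by omega, pvP_succ sc (j + kn) h, pvP_succ sc j h2]
  ring

-- the prefix list built by B's first loop, for any nonempty seed
theorem pv_prefix_go (xs : List Int) : ∀ (ps : List Int) (c : Int),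
    PySem.List.pyGetD ps (-1) 0 = c →
    (xs.foldl (fun (p : List Int) x => p ++ [PySem.List.pyGetD p (-1) 0 + x]) ps)
      = ps ++ (List.range xs.length).map (fun j => c + (xs.take (j + 1)).sum) := by
  induction xs with
  | nil => intro ps c _; simp
  | cons x xs ih =>
    intro ps c hc
    rw [List.foldl_cons, hc,
      ih (ps ++ [c + x]) (c + x) (PySem.List.pyGetD_neg_one_append_singleton ps (c + x) 0)]
    simp only [List.length_cons, List.range_succ_eq_map, List.map_cons, List.map_map,
      List.append_assoc, List.cons_append, List.take_succ_cons,
      List.take_zero, List.sum_cons, List.sum_nil]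
    congr 2
    · ring
    · apply List.map_congr_left
      intro a _
      simp [Function.comp]
      ring

theorem pv_prefix_eq (sc : List Int) :
    (sc.foldl (fun (p : List Int) x => p ++ [PySem.List.pyGetD p (-1) 0 + x]) [0])
      = (List.range (sc.length + 1)).map (fun j => pvP sc j) := by
  rw [pv_prefix_go sc [0] 0 (by decide), List.range_succ_eq_map]
  simp [pvP, Function.comp]

theorem pv_prefix_getD (sc : List Int) (j : Nat) (h : j ≤ sc.length) :
    PySem.List.pyGetD
      (sc.foldl (fun (p : List Int) x => p ++ [PySem.List.pyGetD p (-1) 0 + x]) [0])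
      (j : Int) 0 = pvP sc j := by
  rw [pv_prefix_eq, PySem.List.pyGetD_natCast]
  rw [List.getD_eq_getElem?_getD, List.getElem?_map, List.getElem?_range (by omega)]
  rfl

-- A's loop, re-indexed over List.range, carries (window_sum, selection state);
-- the selection components are pvSelFold.
theorem pv_loopA (sc : List Int) (kn : Nat) (hk : kn ≤ sc.length) :
    ∀ (j : Nat), j ≤ sc.length - kn →
    (List.range j).foldl
      (fun (st : Int × (Int × (Int × Int)) × (Int × (Int × Int))) (t : Nat) =>
        let ws := st.1 + PySem.List.pyGetD sc ((kn : Int) + (t : Int)) 0 - PySem.List.pyGetD sc ((kn : Int) + (t : Int) - (kn : Int)) 0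
        let mx := if ws > st.2.1.1 then (ws, ((kn : Int) + (t : Int) - (kn : Int) + 1, (kn : Int) + (t : Int))) else st.2.1
        let mn := if ws < st.2.2.1 then (ws, ((kn : Int) + (t : Int) - (kn : Int) + 1, (kn : Int) + (t : Int))) else st.2.2
        (ws, mx, mn))
      (pvW sc kn 0, (pvW sc kn 0, ((0 : Int), (kn : Int) - 1)), (pvW sc kn 0, ((0 : Int), (kn : Int) - 1)))
      = (pvW sc kn j, pvSelFold sc kn j) := by
  intro j hj
  induction j with
  | zero => simp [pvSelFold]
  | succ j ih =>
    have hj' : j ≤ sc.length - kn := by omega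
    rw [List.range_succ, List.foldl_append, ih hj']
    simp only [pvSelFold, List.range_succ, List.foldl_append, List.foldl_cons, List.foldl_nil]
    have hidx : ((kn : Int) + (j : Int)) = ((j + kn : Nat) : Int) := by push_cast; ring
    have hlt : j + kn < sc.length := by omega
    have h1 : PySem.List.pyGetD sc ((kn : Int) + (j : Int)) 0 = sc.getD (j + kn) 0 := by
      rw [hidx, PySem.List.pyGetD_natCast]
    have h2 : PySem.List.pyGetD sc ((kn : Int) + (j : Int) - (kn : Int)) 0 = sc.getD j 0 := by
      rw [show (kn : Int) + (j : Int) - (kn : Int) = ((j : Nat) : Int) by ring, PySem.List.pyGetD_natCast]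
    simp only [h1, h2, pvSel]
    rw [pvW_succ sc kn j hlt]
    rw [show (kn : Int) + (j : Int) - (kn : Int) + 1 = (j : Int) + 1 by ring,
      show (kn : Int) + (j : Int) = (j : Int) + 1 + (kn : Int) - 1 by ring]

-- enumerate of a range image
theorem pv_enum_map_range : ∀ (n : Nat) (f : Nat → Int) (s : Int),
    PySem.List.enumerate ((List.range n).map f) s
      = (List.range n).map (fun (t : Nat) => (s + (t : Int), f t)) := by
  intro n
  induction n with
  | zero => intro f s; simp [PySem.List.enumerate_nil]
  | succ n ih =>
    intro f s
    rw [List.range_succ_eq_map]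
    simp only [List.map_cons, List.map_map, PySem.List.enumerate_cons]
    rw [show (f ∘ Nat.succ) = (fun t => f (t + 1)) from rfl, ih (fun t => f (t + 1)) (s + 1)]
    congr 1
    · simp
    · apply List.map_congr_left
      intro a _
      simp only [Function.comp_apply, Prod.mk.injEq]
      constructor
      · push_cast; ring
      · trivial

-- B's max?/min? over the enumerated window sums compute exactly the selection
-- state pvSelFold; the stored range end is always start + kn - 1.
theorem pv_extrema (sc : List Int) (kn : Nat) (j : Nat) :
    PySem.List.max? ((List.range (j + 1)).map (fun (t : Nat) => ((t : Int), pvW sc kn t))) (fun p => p.2)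
      = some ((pvSelFold sc kn j).1.2.1, (pvSelFold sc kn j).1.1)
    ∧ (pvSelFold sc kn j).1.2.2 = (pvSelFold sc kn j).1.2.1 + (kn : Int) - 1
    ∧ PySem.List.min? ((List.range (j + 1)).map (fun (t : Nat) => ((t : Int), pvW sc kn t))) (fun p => p.2)
      = some ((pvSelFold sc kn j).2.2.1, (pvSelFold sc kn j).2.1)
    ∧ (pvSelFold sc kn j).2.2.2 = (pvSelFold sc kn j).2.2.1 + (kn : Int) - 1 := by
  induction j with
  | zero =>
    refine ⟨?_, ?_, ?_, ?_⟩ <;>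
      simp [pvSelFold, PySem.List.max?, PySem.List.min?]
  | succ j ih =>
    obtain ⟨hmax, hmxr, hmin, hmnr⟩ := ih
    have hsel : pvSelFold sc kn (j + 1)
        = pvSel (kn : Int) (pvW sc kn (j + 1)) ((j : Int) + 1) (pvSelFold sc kn j) := by
      simp only [pvSelFold, List.range_succ, List.foldl_append, List.foldl_cons, List.foldl_nil]
    unfold PySem.List.max? at hmax ⊢
    unfold PySem.List.min? at hmin ⊢
    rw [show j + 1 + 1 = (j + 1) + 1 by rfl, List.range_succ, List.map_append,
      List.foldl_append, List.foldl_append, hmax, hmin, hsel]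
    simp only [pvSel]
    refine ⟨?_, ?_, ?_, ?_⟩
    · by_cases h : (pvSelFold sc kn j).1.1 < pvW sc kn (j + 1)
      · simp [h]
      · simp [h]
    · by_cases h : pvW sc kn (j + 1) > (pvSelFold sc kn j).1.1
      · simp [h]
      · simp [h, hmxr]
    · by_cases h : pvW sc kn (j + 1) < (pvSelFold sc kn j).2.1
      · simp [h]
      · simp [h]
    · by_cases h : pvW sc kn (j + 1) < (pvSelFold sc kn j).2.1
      · simp [h]
      · simp [h, hmnr]

-- ===== VERDICT (by name: the statement is the Claim_ definition above) =====
theorem sliding_window_segments_spec : Claim_equal_sliding_window_segments := by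
  intro scores k _
  unfold Spec_sliding_window_segments sliding_window_segments sliding_window_segments_alt
  by_cases hg : k ≤ 0 ∨ (scores.length : Int) < k
  · simp [hg]
  · simp only [hg, if_false]
    rw [not_or, not_le, not_lt] at hg
    obtain ⟨hk0, hkn⟩ := hg
    set kn : Nat := k.toNat with hkn_def
    have hkcast : (kn : Int) = k := Int.toNat_of_nonneg (by omega)
    have hkle : kn ≤ scores.length := by omega
    set m : Nat := scores.length - kn with hm_def
    rw [← hkcast]
    -- A's side
    rw [PySem.List.pyRange_one]
    simp only [List.foldl_map]
    rw [show ((scores.length : Int) - (kn : Int)).toNat = m by omega]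
    have hA : (PySem.List.slice scores none (some ((kn : Nat) : Int))).sum = pvW scores kn 0 := by
      rw [PySem.List.slice_to_natCast]
      simp [pvW, pvP]
    rw [hA, pv_loopA scores kn hkle m (le_refl _)]
    -- B's side: the list of window sums is the map of pvW over the starts
    have hsums : (PySem.List.pyRange 0 ((scores.length : Int) - (kn : Int) + 1) 1).map
        (fun s => PySem.List.pyGetD
            (scores.foldl (fun (p : List Int) x => p ++ [PySem.List.pyGetD p (-1) 0 + x]) [0]) (s + (kn : Int)) 0
          - PySem.List.pyGetD
            (scores.foldl (fun (p : List Int) x => p ++ [PySem.List.pyGetD p (-1) 0 + x]) [0]) s 0)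
        = (List.range (m + 1)).map (fun t => pvW scores kn t) := by
      rw [PySem.List.pyRange_one]
      rw [show ((scores.length : Int) - (kn : Int) + 1 - 0).toNat = m + 1 by omega]
      rw [List.map_map]
      apply List.map_congr_left
      intro t ht
      have htm : t ≤ m := by
        have := List.mem_range.mp ht; omega
      simp only [Function.comp_apply, zero_add]
      rw [show (t : Int) + (kn : Int) = ((t + kn : Nat) : Int) by push_cast; ring]
      rw [pv_prefix_getD scores (t + kn) (by omega), pv_prefix_getD scores t (by omega)]
      rfl
    rw [hsums, pv_enum_map_range (m + 1) (fun t => pvW scores kn t) 0]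
    have hzero : (List.range (m + 1)).map (fun (t : Nat) => ((0 : Int) + (t : Int), pvW scores kn t))
        = (List.range (m + 1)).map (fun (t : Nat) => ((t : Int), pvW scores kn t)) := by
      apply List.map_congr_left; intro a _; simp
    rw [hzero]
    obtain ⟨hmax, hmxr, hmin, hmnr⟩ := pv_extrema scores kn m
    rw [hmax, hmin]
    have e1 : (pvSelFold scores kn m).1
        = ((pvSelFold scores kn m).1.1, ((pvSelFold scores kn m).1.2.1, (pvSelFold scores kn m).1.2.1 + (kn : Int) - 1)) := by
      rw [← hmxr]
    have e2 : (pvSelFold scores kn m).2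
        = ((pvSelFold scores kn m).2.1, ((pvSelFold scores kn m).2.2.1, (pvSelFold scores kn m).2.2.1 + (kn : Int) - 1)) := by
      rw [← hmnr]
    exact congrArg₂ Prod.mk (congrArg some e1) (congrArg some e2)
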